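-- pv_equiv track=rewrite | github.com/jmgomezl/HederaContentCreatorHelper | src/rag/hedera_blog.py | _trim_tldr_bullets
-- ===== SOURCE A (Python) =====
-- def _trim_tldr_bullets(markdown: str, max_bullets: int) -> str:
--     sections = _split_h2_sections(markdown)
--     if not sections:
--         return markdown
--
--     rebuilt: list[str] = []
--     for heading, body in sections:
--         heading_lower = heading.lower()
--         if "tl;dr" not in heading_lower:
--             rebuilt.append(heading)
--             rebuilt.extend(body)
--             continue
--
--         kept: list[str] = []
--         bullet_count = 0
--         for line in body:
--             if line.strip().startswith("- "):
--                 bullet_count += 1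
--                 if bullet_count > max_bullets:
--                     continue
--             kept.append(line)
--         rebuilt.append(heading)
--         rebuilt.extend(kept)
--
--     return "\n".join(rebuilt).strip()
--
-- def _split_h2_sections(markdown: str) -> list[tuple[str, list[str]]]:
--     lines = markdown.splitlines()
--     sections: list[tuple[str, list[str]]] = []
--     current_heading: str | None = None
--     current_body: list[str] = []
--
--     for line in lines:
--         if line.startswith("## "):
--             if current_heading is not None:
--                 sections.append((current_heading, current_body))
--             current_heading = line.strip()
--             current_body = []
--         else:
--             if current_heading is not None:
--                 current_body.append(line)
--
--     if current_heading is not None: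
--         sections.append((current_heading, current_body))
--
--     return sections
-- ===== SOURCE B (Python) =====
-- def _trim_tldr_bullets(markdown: str, max_bullets: int) -> str:
--     out: list[str] = []
--     seen_heading = False
--     in_tldr = False
--     bullet_count = 0
--     for line in markdown.splitlines():
--         if line.startswith("## "):
--             heading = line.strip()
--             seen_heading = True
--             in_tldr = "tl;dr" in heading.lower()
--             bullet_count = 0
--             out.append(heading)
--         elif seen_heading:
--             if in_tldr and line.strip().startswith("- "):
--                 bullet_count += 1
--                 if bullet_count > max_bullets:
--                     continue
--             out.append(line)
--     if not seen_heading: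
--         return markdown
--     return "\n".join(out).strip()
-- ===== Notes on version B (the rewrite author's own statement) =====
-- stated objective: simpler
-- what changed: B replaces A's two-phase pipeline (build a list of (heading, body) sections, then rebuild each section with an inner bullet-trimming loop) by a single pass over the lines with a seen-heading flag, an in-TL;DR flag and a bullet counter reset at each heading, never materialising the sections list.
import Mathlib
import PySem

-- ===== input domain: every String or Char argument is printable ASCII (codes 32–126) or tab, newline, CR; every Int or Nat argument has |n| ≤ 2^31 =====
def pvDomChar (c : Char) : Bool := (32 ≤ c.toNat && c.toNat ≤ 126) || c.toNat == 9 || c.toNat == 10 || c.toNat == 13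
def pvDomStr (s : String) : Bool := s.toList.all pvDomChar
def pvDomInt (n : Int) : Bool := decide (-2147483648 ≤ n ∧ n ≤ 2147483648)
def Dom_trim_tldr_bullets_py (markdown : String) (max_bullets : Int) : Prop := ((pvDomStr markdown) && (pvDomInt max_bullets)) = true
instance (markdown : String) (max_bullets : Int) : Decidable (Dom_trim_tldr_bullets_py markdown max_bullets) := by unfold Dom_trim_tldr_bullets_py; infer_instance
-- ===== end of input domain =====

-- B does the same trimming in one pass over the lines (flags + counter) instead of
-- A's split-into-sections-then-rebuild pipeline; objective: simpler.

-- ===== PORT A =====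
-- _split_h2_sections' loop as structural recursion over the lines, same state
-- (current heading+body as an Option, accumulated sections).
def pvSplitGo (cur : Option (String × List String))
    (secs : List (String × List String)) : List String → List (String × List String)
  | [] =>
    match cur with
    | none => secs
    | some hb => secs ++ [hb]
  | line :: rest =>
    if PySem.Str.startswith line "## " then
      match cur with
      | none => pvSplitGo (some (PySem.Str.strip line, [])) secs rest
      | some hb => pvSplitGo (some (PySem.Str.strip line, [])) (secs ++ [hb]) rest
    else
      match cur with
      | none => pvSplitGo none secs rest
      | some (h, b) => pvSplitGo (some (h, b ++ [line])) secs rest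

-- the inner 'kept' loop of A (bullet_count starts at 0)
def pvKeptGo (max_bullets : Int) (cnt : Int) : List String → List String
  | [] => []
  | line :: rest =>
    if PySem.Str.startswith (PySem.Str.strip line) "- " then
      if cnt + 1 > max_bullets then pvKeptGo max_bullets (cnt + 1) rest
      else line :: pvKeptGo max_bullets (cnt + 1) rest
    else line :: pvKeptGo max_bullets cnt rest

-- the outer 'rebuilt' loop of A
def pvRebuildGo (max_bullets : Int) : List (String × List String) → List String
  | [] => []
  | (h, b) :: rest =>
    if PySem.Str.isIn "tl;dr" (PySem.Str.lower h) then
      h :: (pvKeptGo max_bullets 0 b ++ pvRebuildGo max_bullets rest)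
    else
      h :: (b ++ pvRebuildGo max_bullets rest)

def trim_tldr_bullets_py (markdown : String) (max_bullets : Int) : String :=
  let sections := pvSplitGo none [] (PySem.Str.splitlines markdown)
  if sections = [] then markdown
  else PySem.Str.strip (PySem.Str.join "\n" (pvRebuildGo max_bullets sections))

-- ===== PORT B =====
-- Source B's single pass: state (seen_heading, in_tldr, bullet_count), output built line by line.
def pvAltGo (max_bullets : Int) (seen tldr : Bool) (cnt : Int) : List String → Bool × List String
  | [] => (seen, [])
  | line :: rest =>
    if PySem.Str.startswith line "## " then
      let h := PySem.Str.strip line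
      let r := pvAltGo max_bullets true (PySem.Str.isIn "tl;dr" (PySem.Str.lower h)) 0 rest
      (r.1, h :: r.2)
    else if seen then
      if tldr && PySem.Str.startswith (PySem.Str.strip line) "- " then
        if cnt + 1 > max_bullets then pvAltGo max_bullets seen tldr (cnt + 1) rest
        else
          let r := pvAltGo max_bullets seen tldr (cnt + 1) rest
          (r.1, line :: r.2)
      else
        let r := pvAltGo max_bullets seen tldr cnt rest
        (r.1, line :: r.2)
    else pvAltGo max_bullets seen tldr cnt rest

def trim_tldr_bullets_py_alt (markdown : String) (max_bullets : Int) : String :=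
  let r := pvAltGo max_bullets false false 0 (PySem.Str.splitlines markdown)
  if r.1 then PySem.Str.strip (PySem.Str.join "\n" r.2) else markdown

-- ===== PRECONDITION & SPEC =====
def Spec_trim_tldr_bullets_py (markdown : String) (max_bullets : Int) (out : String) : Prop := out = trim_tldr_bullets_py_alt markdown max_bullets
instance (markdown : String) (max_bullets : Int) (out : String) : Decidable (Spec_trim_tldr_bullets_py markdown max_bullets out) := by unfold Spec_trim_tldr_bullets_py; infer_instance

-- ===== CLAIM (what is proved, stated in full; the proofs are below) =====
def Claim_equal_trim_tldr_bullets_py : Prop := ∀ (markdown : String) (max_bullets : Int), Dom_trim_tldr_bullets_py markdown max_bullets → Spec_trim_tldr_bullets_py markdown max_bullets (trim_tldr_bullets_py markdown max_bullets)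

-- ===== LEMMAS AND PROOFS =====

-- number of bullet lines in a body (Int, to match bullet_count)
def pvNB : List String → Int
  | [] => 0
  | line :: rest =>
    (if PySem.Str.startswith (PySem.Str.strip line) "- " then 1 else 0) + pvNB rest

theorem pvNB_append (b c : List String) : pvNB (b ++ c) = pvNB b + pvNB c := by
  induction b with
  | nil => simp [pvNB]
  | cons l b ih => simp only [List.cons_append, pvNB, ih]; ring

theorem pvSplitGo_acc (ls : List String) (cur : Option (String × List String))
    (secs : List (String × List String)) :
    pvSplitGo cur secs ls = secs ++ pvSplitGo cur [] ls := by
  induction ls generalizing cur secs with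
  | nil => cases cur <;> simp [pvSplitGo]
  | cons line rest ih =>
    cases cur with
    | none =>
      by_cases h : PySem.Str.startswith line "## " = true
      · simp only [pvSplitGo, if_pos h]
        exact ih _ secs
      · simp only [pvSplitGo, if_neg h]
        exact ih none secs
    | some hb =>
      obtain ⟨hh, bb⟩ := hb
      by_cases h : PySem.Str.startswith line "## " = true
      · simp only [pvSplitGo, if_pos h]
        rw [ih _ (secs ++ [(hh, bb)]), ih _ ([] ++ [(hh, bb)])]
        simp
      · simp only [pvSplitGo, if_neg h]
        exact ih _ secs

theorem pvRebuildGo_append (m : Int) (xs ys : List (String × List String)) :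
    pvRebuildGo m (xs ++ ys) = pvRebuildGo m xs ++ pvRebuildGo m ys := by
  induction xs with
  | nil => simp [pvRebuildGo]
  | cons hb xs ih =>
    obtain ⟨h, b⟩ := hb
    by_cases ht : PySem.Str.isIn "tl;dr" (PySem.Str.lower h) = true
    · simp only [List.cons_append, pvRebuildGo, if_pos ht, ih, List.append_assoc]
    · simp only [List.cons_append, pvRebuildGo, if_neg ht, ih, List.append_assoc]

theorem pvKeptGo_append (m : Int) (b c : List String) (cnt : Int) :
    pvKeptGo m cnt (b ++ c) = pvKeptGo m cnt b ++ pvKeptGo m (cnt + pvNB b) c := by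
  induction b generalizing cnt with
  | nil => simp [pvKeptGo, pvNB]
  | cons l b ih =>
    by_cases hl : PySem.Str.startswith (PySem.Str.strip l) "- " = true
    · have hnb : cnt + pvNB (l :: b) = (cnt + 1) + pvNB b := by
        simp only [pvNB, if_pos hl]; ring
      by_cases hc : cnt + 1 > m
      · simp only [List.cons_append, pvKeptGo, if_pos hl, if_pos hc, ih, hnb]
      · simp only [List.cons_append, pvKeptGo, if_pos hl, if_neg hc, ih, hnb,
          List.cons_append]
    · have hnb : cnt + pvNB (l :: b) = cnt + pvNB b := by
        simp only [pvNB, if_neg hl]; ring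
      simp only [List.cons_append, pvKeptGo, if_neg hl, ih, hnb]

theorem pvAltGo_seen (m : Int) (t : Bool) (c : Int) (ls : List String) :
    (pvAltGo m true t c ls).1 = true := by
  induction ls generalizing t c with
  | nil => simp [pvAltGo]
  | cons line rest ih =>
    by_cases h : PySem.Str.startswith line "## " = true
    · simp only [pvAltGo, if_pos h]
      exact ih _ 0
    · by_cases hb : (t && PySem.Str.startswith (PySem.Str.strip line) "- ") = true
      · by_cases hc : c + 1 > m
        · simp only [pvAltGo, if_neg h, if_pos hb, if_pos hc]
          exact ih t (c + 1)
        · simp only [pvAltGo, if_neg h, if_pos hb, if_neg hc]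
          exact ih t (c + 1)
      · simp only [pvAltGo, if_neg h, if_neg hb]
        exact ih t c

theorem pvAltGo_cnt_irrel (m : Int) (s : Bool) (c c' : Int) (ls : List String) :
    pvAltGo m s false c ls = pvAltGo m s false c' ls := by
  induction ls generalizing s c c' with
  | nil => simp [pvAltGo]
  | cons line rest ih =>
    by_cases h : PySem.Str.startswith line "## " = true
    · simp only [pvAltGo, if_pos h]
    · cases s with
      | true =>
        simp only [pvAltGo, if_neg h, Bool.false_and, Bool.false_eq_true, if_false,
          if_true]
        rw [ih true c c']
      | false =>
        simp only [pvAltGo, if_neg h, Bool.false_eq_true, if_false]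
        exact ih false c c'

theorem pvMain (m : Int) (ls : List String) (h : String) (b : List String) :
    pvRebuildGo m (pvSplitGo (some (h, b)) [] ls)
      = (if PySem.Str.isIn "tl;dr" (PySem.Str.lower h) then h :: pvKeptGo m 0 b
         else h :: b)
        ++ (pvAltGo m true (PySem.Str.isIn "tl;dr" (PySem.Str.lower h)) (pvNB b) ls).2 := by
  induction ls generalizing h b with
  | nil =>
    by_cases ht : PySem.Str.isIn "tl;dr" (PySem.Str.lower h) = true <;>
      have ht' := ht <;> simp at ht' <;>
      simp [pvSplitGo, pvRebuildGo, pvAltGo, ht']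
  | cons line rest ih =>
    by_cases hl : PySem.Str.startswith line "## " = true
    · -- new heading: close the current section
      have hl' := hl; simp at hl'
      have hsplit : pvSplitGo (some (h, b)) [] (line :: rest)
          = [(h, b)] ++ pvSplitGo (some (PySem.Str.strip line, [])) [] rest := by
        simp only [pvSplitGo, if_pos hl]
        exact pvSplitGo_acc _ _ _
      rw [hsplit, pvRebuildGo_append, ih (PySem.Str.strip line) []]
      by_cases ht : PySem.Str.isIn "tl;dr" (PySem.Str.lower h) = true <;>
        have ht' := ht <;> simp at ht' <;>
      by_cases ht2 : PySem.Str.isIn "tl;dr" (PySem.Str.lower (PySem.Str.strip line)) = true <;>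
        have ht2' := ht2 <;> simp at ht2' <;>
        simp [pvRebuildGo, pvAltGo, pvKeptGo, pvNB, hl', ht', ht2']
    · -- body line of the current section
      have hl' := hl; simp at hl'
      have hsplit : pvSplitGo (some (h, b)) [] (line :: rest)
          = pvSplitGo (some (h, b ++ [line])) [] rest := by
        simp only [pvSplitGo, if_neg hl]
      rw [hsplit, ih h (b ++ [line])]
      by_cases ht : PySem.Str.isIn "tl;dr" (PySem.Str.lower h) = true
      · have ht' := ht; simp at ht'
        by_cases hbl : PySem.Str.startswith (PySem.Str.strip line) "- " = true
        · have hbl' := hbl; simp at hbl'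
          have hnb : pvNB (b ++ [line]) = pvNB b + 1 := by
            rw [pvNB_append]; simp [pvNB, hbl']
          rw [pvKeptGo_append]
          by_cases hc : pvNB b + 1 > m
          · simp [pvAltGo, pvKeptGo, hl', ht', hbl', hnb, hc]
          · simp [pvAltGo, pvKeptGo, hl', ht', hbl', hnb, hc]
        · have hbl' := hbl; simp at hbl'
          have hnb : pvNB (b ++ [line]) = pvNB b := by
            rw [pvNB_append]; simp [pvNB, hbl']
          rw [pvKeptGo_append]
          simp [pvAltGo, pvKeptGo, hl', ht', hbl', hnb]
      · rw [Bool.not_eq_true] at ht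
        rw [ht, pvAltGo_cnt_irrel m true (pvNB (b ++ [line])) (pvNB b) rest]
        simp [pvAltGo, hl']

theorem pvTop (m : Int) (ls : List String) :
    (pvSplitGo none [] ls = [] ∧ (pvAltGo m false false 0 ls).1 = false)
    ∨ (pvSplitGo none [] ls ≠ [] ∧ (pvAltGo m false false 0 ls).1 = true
       ∧ pvRebuildGo m (pvSplitGo none [] ls) = (pvAltGo m false false 0 ls).2) := by
  induction ls with
  | nil => left; simp [pvSplitGo, pvAltGo]
  | cons line rest ih =>
    by_cases hl : PySem.Str.startswith line "## " = true
    · right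
      have hl' := hl; simp at hl'
      have hsplit : pvSplitGo none [] (line :: rest)
          = pvSplitGo (some (PySem.Str.strip line, [])) [] rest := by
        simp only [pvSplitGo, if_pos hl]
      have hmain := pvMain m rest (PySem.Str.strip line) []
      refine ⟨?_, ?_, ?_⟩
      · intro hcontra
        rw [hcontra] at hsplit
        have hrb := congrArg (pvRebuildGo m) hsplit
        rw [hmain] at hrb
        by_cases ht : PySem.Str.isIn "tl;dr" (PySem.Str.lower (PySem.Str.strip line)) = true <;>
          have ht' := ht <;> simp at ht' <;>
          simp [pvRebuildGo, ht'] at hrb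
      · simp only [pvAltGo, if_pos hl]
        exact pvAltGo_seen m _ 0 rest
      · rw [hsplit, hmain]
        have halt2 : (pvAltGo m false false 0 (line :: rest)).2
            = PySem.Str.strip line
                :: (pvAltGo m true
                      (PySem.Str.isIn "tl;dr" (PySem.Str.lower (PySem.Str.strip line))) 0 rest).2 := by
          simp only [pvAltGo, if_pos hl]
        rw [halt2]
        by_cases ht : PySem.Str.isIn "tl;dr" (PySem.Str.lower (PySem.Str.strip line)) = true <;>
          have ht' := ht <;> simp at ht' <;>
          simp [pvKeptGo, pvNB, ht']
    · have hsplit : pvSplitGo none [] (line :: rest) = pvSplitGo none [] rest := by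
        simp only [pvSplitGo, if_neg hl]
      have halt : pvAltGo m false false 0 (line :: rest) = pvAltGo m false false 0 rest := by
        simp only [pvAltGo, if_neg hl, Bool.false_eq_true, if_false]
      rw [hsplit, halt]
      exact ih

-- ===== VERDICT (by name: the statement is the Claim_ definition above) =====
theorem trim_tldr_bullets_py_spec : Claim_equal_trim_tldr_bullets_py := by
  intro markdown max_bullets _
  unfold Spec_trim_tldr_bullets_py trim_tldr_bullets_py trim_tldr_bullets_py_alt
  rcases pvTop max_bullets (PySem.Str.splitlines markdown) with ⟨h1, h2⟩ | ⟨h1, h2, h3⟩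
  · simp [h1, h2]
  · simp [h1, h2, h3]
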